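-- pv_equiv track=rewrite | github.com/Ronny0113/parallel | Lab3/3.py | calc_tension
-- ===== SOURCE A (Python) =====
-- import itertools
--
-- def get_combination(index, size):
--     return [-1 if x == '0' else 1 for x in f'{{0:0{size}b}}'.format(index)]
--
-- def calc_tension(combination_range, actor_factor_list, actor_parir_factor_list):
--     tension_list = []
--
--     size = len(actor_factor_list)
--
--     for combination_id in range(combination_range[0], combination_range[1]):
--         combination = get_combination(combination_id, size)
--
--         actor_sum = sum(
--             [i*j for i, j in zip(combination, actor_factor_list)])
--         pair_sum = sum([actor_parir_factor_list[i] * pair[0] * pair[1]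
--                         for (i, pair) in enumerate(itertools.combinations(combination, 2))])
--         tension = actor_sum + pair_sum
--
--         tension_list.append(tension)
--
--     return tension_list
-- ===== SOURCE B (Python) =====
-- def calc_tension(combination_range, actor_factor_list, actor_parir_factor_list):
--     lo, hi = combination_range[0], combination_range[1]
--     if lo >= hi:
--         return []
--     size = len(actor_factor_list)
--     # start of row i in the lexicographic pair-factor list (prefix sums of row lengths)
--     row_start = []
--     acc = 0
--     for i in range(size):
--         row_start.append(acc)
--         acc += size - 1 - i
--
--     def pw(i, j):  # factor of the unordered pair {i, j}
--         a, b = (i, j) if i < j else (j, i)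
--         return actor_parir_factor_list[row_start[a] + (b - a - 1)]
--
--     # symmetric neighbour table: each pair is visible from both endpoints
--     nbr = [[(j, pw(i, j)) for j in range(size) if j != i] for i in range(size)]
--     # signs of the first id, most significant first
--     bits = [1 if (lo >> (size - 1 - p)) & 1 else -1 for p in range(size)]
--     # full tension once (each pair counted at its smaller endpoint)
--     t = 0
--     for i in range(size):
--         t += actor_factor_list[i] * bits[i]
--         for j, w in nbr[i]:
--             if i < j:
--                 t += w * bits[i] * bits[j]
--     out = [t]
--     for _ in range(lo + 1, hi):
--         # binary increment of the sign vector: flip the trailing '1' signs and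
--         # the first '-1'; each flip adjusts the tension by its own terms only
--         p = size - 1
--         while True:
--             s = bits[p]
--             bits[p] = -s
--             t -= 2 * s * actor_factor_list[p]
--             for j, w in nbr[p]:
--                 t -= 2 * s * w * bits[j]
--             if s == 1:
--                 p -= 1
--             else:
--                 break
--         out.append(t)
--     return out
-- ===== Notes on version B (the rewrite author's own statement) =====
-- stated objective: alternative
-- what changed: B walks consecutive ids incrementally instead of recomputing each from scratch: it keeps the sign vector and current tension as state and, per id, performs a binary increment that flips only the trailing signs, adjusting the tension by each flipped actor's linear term and its neighbour pair terms, looked up in a precomputed symmetric neighbour table with closed-form pair offsets (A rebuilds the combination from a binary string and re-sums all pairs for every id).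
-- outside the precondition, e.g. on calc_tension((-1, 0), [1], [5]): A returns [6], B returns [1]; on calc_tension((2, 3), [1], [5]): A returns [-4], B returns [-1]
import Mathlib
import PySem

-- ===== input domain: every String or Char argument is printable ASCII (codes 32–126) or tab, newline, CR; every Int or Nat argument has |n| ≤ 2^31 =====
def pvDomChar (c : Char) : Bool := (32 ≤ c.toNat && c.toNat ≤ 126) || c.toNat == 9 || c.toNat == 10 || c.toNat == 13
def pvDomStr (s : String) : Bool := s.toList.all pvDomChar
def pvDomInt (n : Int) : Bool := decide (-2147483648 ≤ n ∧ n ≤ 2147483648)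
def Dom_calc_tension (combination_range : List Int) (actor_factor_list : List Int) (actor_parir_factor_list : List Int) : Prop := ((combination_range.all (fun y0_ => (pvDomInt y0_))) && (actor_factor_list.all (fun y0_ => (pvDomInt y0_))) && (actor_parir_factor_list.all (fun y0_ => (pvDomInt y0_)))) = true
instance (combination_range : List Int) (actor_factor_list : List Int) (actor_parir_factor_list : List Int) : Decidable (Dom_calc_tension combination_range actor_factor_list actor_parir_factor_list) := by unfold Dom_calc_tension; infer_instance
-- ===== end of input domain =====

-- B replaces A's per-id full recomputation (binary string, all pairs) by an
-- incremental walk over consecutive ids: a binary increment flips only the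
-- trailing signs and the tension is adjusted by the flipped actors' own terms,
-- looked up in a precomputed symmetric neighbour table.

-- ===== PORT A =====
-- binary digits of a natural number, most significant first ([] for 0);
-- exact for format(n, 'b') on n ≥ 1 (Pre_ restricts the ids to n ≥ 0)
def pvNatBin (n : Nat) : List Char :=
  if _h : n = 0 then []
  else pvNatBin (n / 2) ++ [if n % 2 = 1 then '1' else '0']
decreasing_by exact Nat.div_lt_self (Nat.pos_of_ne_zero _h) (by omega)

-- f'{{0:0{size}b}}'.format(index): binary digits zero-padded to width size
-- (exact for index ≥ 0, which Pre_ guarantees)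
def pvBinFormat (index : Int) (size : Int) : List Char :=
  let digits := if index = 0 then ['0'] else pvNatBin index.toNat
  List.replicate (size.toNat - digits.length) '0' ++ digits

def get_combination (index : Int) (size : Int) : List Int :=
  (pvBinFormat index size).map (fun c => if c = '0' then -1 else 1)

-- itertools.combinations(l, 2): lexicographic pairs of elements (exact for r = 2)
def pvPairs : List Int → List (Int × Int)
  | [] => []
  | x :: xs => xs.map (fun y => (x, y)) ++ pvPairs xs

def calc_tension (combination_range : List Int) (actor_factor_list : List Int) (actor_parir_factor_list : List Int) : List Int :=
  let size : Int := actor_factor_list.length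
  (PySem.List.pyRange (PySem.List.pyGetD combination_range 0 0) (PySem.List.pyGetD combination_range 1 0) 1).map
    (fun combination_id =>
      let combination := get_combination combination_id size
      let actor_sum := ((combination.zip actor_factor_list).map (fun p => p.1 * p.2)).sum
      let pair_sum := ((PySem.List.enumerate (pvPairs combination) 0).map
          (fun p => PySem.List.pyGetD actor_parir_factor_list p.1 0 * p.2.1 * p.2.2)).sum
      actor_sum + pair_sum)

-- ===== PORT B =====
-- 'for i in range(size): row_start.append(acc); acc += size - 1 - i'
-- (acc and the entries are nonnegative counts, ported as Nat)
def pvRowStart (size : Nat) : List Nat × Nat :=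
  (List.range size).foldl (fun st i => (st.1 ++ [st.2], st.2 + (size - 1 - i))) ([], 0)

-- pw(i, j): factor of the unordered pair {i, j}; indices are in range under
-- Pre_, so plain indexing is ported as pyGetD with default 0
def pvPw (apfl : List Int) (row_start : List Nat) (i j : Nat) : Int :=
  let ab := if i < j then (i, j) else (j, i)
  PySem.List.pyGetD apfl ((row_start.getD ab.1 0 + (ab.2 - ab.1 - 1) : Nat) : Int) 0

-- the symmetric neighbour table
-- nbr = [[(j, pw(i, j)) for j in range(size) if j != i] for i in range(size)]
def pvNbr (apfl : List Int) (size : Nat) : List (List (Nat × Int)) :=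
  (List.range size).map (fun i =>
    ((List.range size).filter (fun j => j ≠ i)).map
      (fun j => (j, pvPw apfl ((pvRowStart size).1) i j)))

-- the while loop: flip bits[p], adjust t, continue at p-1 while the flipped
-- sign was 1.  Python's p would go below 0 only when every sign is 1, which is
-- unreachable under Pre_ (there is always a '-1' to break at); the port stops
-- at p = 0 instead of wrapping around.
def pvIncLoop (afl : List Int) (nbr : List (List (Nat × Int))) : Nat → List Int → Int → List Int × Int
  | p, bits, t =>
    let s := bits.getD p 0
    let bits' := bits.set p (-s)
    let t' := (nbr.getD p []).foldl (fun a q => a - 2 * s * q.2 * bits'.getD q.1 0)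
      (t - 2 * s * afl.getD p 0)
    if s = 1 then
      match p with
      | 0 => (bits', t')
      | p' + 1 => pvIncLoop afl nbr p' bits' t'
    else (bits', t')

def calc_tension_alt (combination_range : List Int) (actor_factor_list : List Int) (actor_parir_factor_list : List Int) : List Int :=
  let lo := PySem.List.pyGetD combination_range 0 0
  let hi := PySem.List.pyGetD combination_range 1 0
  if hi ≤ lo then [] else
  let size := actor_factor_list.length
  -- nbr[i] = [(j, pw(i, j)) for j in range(size) if j != i]
  let nbr := pvNbr actor_parir_factor_list size
  -- bits = [1 if (lo >> (size-1-p)) & 1 else -1 …]; '>>' is floor division by a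
  -- power of two and '& 1' is mod 2 (exact for every int)
  let bits := (List.range size).map (fun p =>
    if PySem.Int.mod (PySem.Int.floordiv lo ((2 : Int) ^ (size - 1 - p))) 2 = 1 then (1 : Int) else -1)
  let t := (List.range size).foldl (fun t i =>
    (nbr.getD i []).foldl
      (fun t q => if i < q.1 then t + q.2 * bits.getD i 0 * bits.getD q.1 0 else t)
      (t + actor_factor_list.getD i 0 * bits.getD i 0)) 0
  let st := (PySem.List.pyRange (lo + 1) hi 1).foldl
    (fun (st : List Int × Int × List Int) _ =>
      let r := pvIncLoop actor_factor_list nbr (size - 1) st.1 st.2.1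
      (r.1, r.2, st.2.2 ++ [r.2])) (bits, t, [t])
  st.2.2

-- ===== PRECONDITION & SPEC =====
-- Pre_ excludes: combination_range shorter than 2 and too few pair factors (IndexError in A),
-- and ids outside the natural bitmask domain [0, 2^size) — there A's '{:0{size}b}' string
-- carries a '-' sign character or extra digits and A's value (when the pair-factor list
-- happens to be long enough not to raise) is an artefact of signing/overflowing the format.
def Pre_calc_tension (combination_range : List Int) (actor_factor_list : List Int) (actor_parir_factor_list : List Int) : Prop :=
  2 ≤ combination_range.length ∧
  (PySem.List.pyGetD combination_range 0 0 < PySem.List.pyGetD combination_range 1 0 →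
    0 ≤ PySem.List.pyGetD combination_range 0 0 ∧
    PySem.List.pyGetD combination_range 1 0 ≤ 2 ^ actor_factor_list.length ∧
    actor_factor_list.length.choose 2 ≤ actor_parir_factor_list.length)
instance (combination_range : List Int) (actor_factor_list : List Int) (actor_parir_factor_list : List Int) : Decidable (Pre_calc_tension combination_range actor_factor_list actor_parir_factor_list) := by unfold Pre_calc_tension; infer_instance

def pvWitness_calc_tension : List Int × List Int × List Int := ([0, 2], [1, 2], [3])

def Spec_calc_tension (combination_range : List Int) (actor_factor_list : List Int) (actor_parir_factor_list : List Int) (out : List Int) : Prop := out = calc_tension_alt combination_range actor_factor_list actor_parir_factor_list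
instance (combination_range : List Int) (actor_factor_list : List Int) (actor_parir_factor_list : List Int) (out : List Int) : Decidable (Spec_calc_tension combination_range actor_factor_list actor_parir_factor_list out) := by unfold Spec_calc_tension; infer_instance

-- ===== CLAIM (what is proved, stated in full; the proofs are below) =====
def Claim_equal_calc_tension : Prop := ∀ (combination_range : List Int) (actor_factor_list : List Int) (actor_parir_factor_list : List Int), Dom_calc_tension combination_range actor_factor_list actor_parir_factor_list → Pre_calc_tension combination_range actor_factor_list actor_parir_factor_list → Spec_calc_tension combination_range actor_factor_list actor_parir_factor_list (calc_tension combination_range actor_factor_list actor_parir_factor_list)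

-- ===== LEMMAS AND PROOFS =====

-- canonical objects ----------------------------------------------------------

-- the sign vector of id n at width w, most significant bit first
def pvCombo (n w : Nat) : List Int :=
  (List.range w).map (fun k => if n.testBit (w - 1 - k) then 1 else -1)

-- the same vector least significant bit first, by repeated divmod
def pvLCombo : Nat → Nat → List Int
  | _, 0 => []
  | n, w + 1 => (if n % 2 = 1 then 1 else -1) :: pvLCombo (n / 2) w

-- row offsets in the lexicographic pair list
def pvRS (w : Nat) : Nat → Nat
  | 0 => 0
  | i + 1 => pvRS w i + (w - 1 - i)

-- pair factor of (i, j), i < j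
def pvWgt (apfl : List Int) (w i j : Nat) : Int :=
  PySem.List.pyGetD apfl ((pvRS w i + (j - i - 1) : Nat) : Int) 0

-- the tension of a sign vector b (w = number of actors)
def pvTen (afl apfl : List Int) (b : List Int) : Int :=
  ∑ i ∈ Finset.range afl.length,
    (afl.getD i 0 * b.getD i 0 +
      ∑ j ∈ Finset.Ico (i + 1) afl.length, pvWgt apfl afl.length i j * b.getD i 0 * b.getD j 0)

-- the lexicographic pair-position table
def pvPairIdx (w : Nat) : List (Nat × Nat) :=
  (List.range w).flatMap (fun i => (List.range' (i + 1) (w - (i + 1))).map (fun j => (i, j)))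


-- A-side characterisation ----------------------------------------------------

theorem pvNatBin_len {w n : Nat} (h : n < 2 ^ w) : (pvNatBin n).length ≤ w := by
  induction w generalizing n with
  | zero => interval_cases n; simp [pvNatBin]
  | succ w ih =>
    rw [pvNatBin]
    split
    · simp
    · have : n / 2 < 2 ^ w := by omega
      have := ih this
      simp [List.length_append]; omega

theorem pvNatBin_pad {w n : Nat} (h : n < 2 ^ w) :
    List.replicate (w - (pvNatBin n).length) '0' ++ pvNatBin n
      = (List.range w).map (fun k => if n.testBit (w - 1 - k) then '1' else '0') := by
  induction w generalizing n with
  | zero => interval_cases n; simp [pvNatBin]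
  | succ w ih =>
    by_cases hn : n = 0
    · subst hn
      simp [pvNatBin, List.map_const']
    · have hp : 2 ^ (w + 1) = 2 ^ w * 2 := pow_succ 2 w
      have h2 : n / 2 < 2 ^ w := by omega
      have hlen : (pvNatBin (n / 2)).length ≤ w := pvNatBin_len h2
      rw [pvNatBin, dif_neg hn, List.range_succ, List.map_append]
      have hrest : (List.range w).map (fun k => if n.testBit (w + 1 - 1 - k) then '1' else '0')
          = (List.range w).map (fun k => if (n / 2).testBit (w - 1 - k) then '1' else '0') := by
        apply List.map_congr_left
        intro k hk
        rw [List.mem_range] at hk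
        have hkk : w + 1 - 1 - k = (w - 1 - k) + 1 := by omega
        rw [hkk, ← Nat.testBit_div_two]
      simp only [List.length_append, List.length_cons, List.length_nil, Nat.zero_add]
      rw [show w + 1 - ((pvNatBin (n / 2)).length + (0 + 1)) = w - (pvNatBin (n / 2)).length by
        omega]
      rw [← List.append_assoc, hrest, ih h2]
      congr 1
      simp only [List.map_cons, List.map_nil, show w + 1 - 1 - w = 0 from by omega,
        Nat.testBit_zero]
      rcases Nat.mod_two_eq_zero_or_one n with hm | hm <;> simp [hm]

theorem get_combination_eq {index : Int} {w : Nat} (h0 : 0 ≤ index)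
    (h1 : index.toNat < 2 ^ w) (hw : 1 ≤ w) :
    get_combination index (w : Int) = pvCombo index.toNat w := by
  have key : pvBinFormat index (w : Int)
      = (List.range w).map (fun k => if index.toNat.testBit (w - 1 - k) then '1' else '0') := by
    unfold pvBinFormat
    by_cases hz : index = 0
    · subst hz
      obtain ⟨w', rfl⟩ : ∃ w', w = w' + 1 := ⟨w - 1, by omega⟩
      simp only [if_pos trivial, Int.toNat_natCast, Int.toNat_zero, Nat.zero_testBit,
        Bool.false_eq_true, if_false, List.map_const', List.length_range, List.length_cons,
        List.length_nil]
      rw [show w' + 1 - (0 + 1) = w' by omega, ← List.replicate_succ']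
    · simp only [hz, ite_false, Int.toNat_natCast]
      exact pvNatBin_pad h1
  unfold get_combination pvCombo
  rw [key, List.map_map]
  apply List.map_congr_left
  intro k _
  by_cases hb : index.toNat.testBit (w - 1 - k) <;> simp [hb]

theorem reverse_map_range {α : Type} (w : Nat) (f : Nat → α) :
    ((List.range w).map f).reverse = (List.range w).map (fun k => f (w - 1 - k)) := by
  apply List.ext_getElem
  · simp
  · intro i h1 h2
    simp only [List.getElem_reverse, List.getElem_map, List.getElem_range,
      List.length_map, List.length_range] at *

theorem pvPairs_eq (s : List Int) :
    pvPairs s = (pvPairIdx s.length).map (fun q => (s.getD q.1 0, s.getD q.2 0)) := by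
  induction s with
  | nil => rfl
  | cons x xs ih =>
    have hxs : pvPairs (x :: xs) = xs.map (fun y => (x, y)) ++ pvPairs xs := rfl
    unfold pvPairIdx
    rw [hxs, List.length_cons, List.range_succ_eq_map, List.flatMap_cons, List.flatMap_map,
      List.map_append, List.map_flatMap]
    congr 1
    · apply List.ext_getElem
      · simp only [List.length_map, List.length_range']
        omega
      · intro i h1 h2
        have hi : i < xs.length := by simpa using h1
        simp only [List.getElem_map, List.getElem_range']
        rw [show 0 + 1 + 1 * i = i + 1 from by omega, List.getD_cons_succ,
          List.getD_cons_zero, List.getD_eq_getElem xs 0 hi]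
    · rw [ih, pvPairIdx, List.map_flatMap]
      congr 1
      funext i
      apply List.ext_getElem
      · simp only [List.length_map, List.length_range']
        omega
      · intro k h1 h2
        simp only [List.getElem_map, List.getElem_range', Nat.succ_eq_add_one]
        rw [show i + 1 + 1 + 1 * k = (i + 1 + 1 * k) + 1 from by omega, List.getD_cons_succ,
          show i + 1 + 1 * k = (i + 1 * k) + 1 from by omega, List.getD_cons_succ]

theorem enumerate_map {α β : Type} (g : α → β) (l : List α) (s : Int) :
    PySem.List.enumerate (l.map g) s = (PySem.List.enumerate l s).map (fun q => (q.1, g q.2)) := by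
  induction l generalizing s with
  | nil => rfl
  | cons x xs ih => simp [PySem.List.enumerate_cons, ih]

-- sum bridges ----------------------------------------------------------------

theorem lsum_range {M : Type} [AddCommMonoid M] (n : Nat) (f : Nat → M) :
    ((List.range n).map f).sum = ∑ i ∈ Finset.range n, f i := by
  induction n with
  | zero => simp
  | succ n ih => rw [List.range_succ, List.map_append, List.sum_append, Finset.sum_range_succ, ih]; simp

theorem zip_mul_sum_range : ∀ (u v : List Int), u.length = v.length →
    ((u.zip v).map (fun p => p.1 * p.2)).sum
      = ∑ i ∈ Finset.range u.length, v.getD i 0 * u.getD i 0 := by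
  intro u
  induction u with
  | nil => intro v _; simp
  | cons x xs ih =>
    intro v hv
    cases v with
    | nil => simp at hv
    | cons y ys =>
      rw [List.zip_cons_cons, List.map_cons, List.sum_cons, ih ys (by simpa using hv)]
      rw [List.length_cons, Finset.sum_range_succ']
      simp only [List.getD_cons_succ, List.getD_cons_zero]
      rw [mul_comm]
      exact (add_comm _ _)


-- sign vectors ---------------------------------------------------------------

theorem pvLCombo_eq (n w : Nat) :
    pvLCombo n w = (List.range w).map (fun k => if n.testBit k then 1 else -1) := by
  induction w generalizing n with
  | zero => rfl
  | succ w ih =>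
    rw [pvLCombo, ih, List.range_succ_eq_map, List.map_cons, List.map_map]
    congr 1
    · rcases Nat.mod_two_eq_zero_or_one n with h | h <;>
        simp [Nat.testBit_zero, h]
    · apply List.map_congr_left
      intro k _
      simp only [Function.comp, ← Nat.testBit_div_two]

theorem pvCombo_eq_reverse (n w : Nat) : pvCombo n w = (pvLCombo n w).reverse := by
  rw [pvLCombo_eq, reverse_map_range]
  rfl

theorem length_pvCombo (n w : Nat) : (pvCombo n w).length = w := by simp [pvCombo]

theorem length_pvLCombo (n w : Nat) : (pvLCombo n w).length = w := by simp [pvLCombo_eq]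

-- binary increment on a least-significant-first sign vector
def pvIncL : List Int → List Int
  | [] => []
  | s :: r => if s = 1 then -1 :: pvIncL r else (-s) :: r

theorem pvIncL_lCombo (w : Nat) : ∀ n : Nat, pvIncL (pvLCombo n w) = pvLCombo (n + 1) w := by
  induction w with
  | zero => intro n; rfl
  | succ w ih =>
    intro n
    rcases Nat.mod_two_eq_zero_or_one n with h | h
    · rw [pvLCombo, pvLCombo, h, if_neg (by omega), pvIncL,
        if_neg (by norm_num), show (n + 1) % 2 = 1 from by omega,
        if_pos rfl, show (n + 1) / 2 = n / 2 from by omega]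
      norm_num
    · rw [pvLCombo, pvLCombo, h, if_pos rfl, pvIncL, if_pos rfl,
        show (n + 1) % 2 = 0 from by omega, if_neg (by omega),
        show (n + 1) / 2 = n / 2 + 1 from by omega, ih]

-- list indexing helpers ------------------------------------------------------

theorem getD_set_lt {l : List Int} {p : Nat} (x : Int) (q : Nat) (hp : p < l.length) :
    (l.set p x).getD q 0 = if q = p then x else l.getD q 0 := by
  unfold List.getD
  by_cases h : q = p
  · subst h
    rw [if_pos rfl, List.getElem?_set_self (by omega)]
    rfl
  · rw [if_neg h, List.getElem?_set_ne (by omega)]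

theorem getD_append_length (l1 l2 : List Int) (x : Int) :
    (l1 ++ x :: l2).getD l1.length 0 = x := by
  unfold List.getD
  rw [List.getElem?_append_right (le_refl _)]
  simp

theorem set_append_length (l1 l2 : List Int) (x y : Int) :
    (l1 ++ x :: l2).set l1.length y = l1 ++ y :: l2 := by
  rw [List.set_append_right _ _ (le_refl _)]
  simp

-- fold shapes ----------------------------------------------------------------

theorem foldl_sub {α : Type} (l : List α) (f : α → Int) (init : Int) :
    l.foldl (fun a x => a - f x) init = init - (l.map f).sum := by
  induction l generalizing init with
  | nil => simp
  | cons x xs ih => rw [List.foldl_cons, ih, List.map_cons, List.sum_cons]; ring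

theorem sum_map_filter {α : Type} (l : List α) (p : α → Bool) (g : α → Int) :
    ((l.filter p).map g).sum = (l.map (fun x => if p x then g x else 0)).sum := by
  induction l with
  | nil => rfl
  | cons x xs ih =>
    by_cases h : p x = true
    · rw [List.filter_cons_of_pos h, List.map_cons, List.sum_cons, ih, List.map_cons,
        List.sum_cons, if_pos h]
    · rw [List.filter_cons_of_neg h, ih, List.map_cons, List.sum_cons, if_neg h, zero_add]


-- A's enumerate-over-pairs sum, re-indexed by row offsets ---------------------

theorem lenFlat (w k : Nat) :
    ((List.range k).flatMap
      (fun i => (List.range' (i + 1) (w - (i + 1))).map (fun j => (i, j)))).length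
      = pvRS w k := by
  induction k with
  | zero => rfl
  | succ k ih =>
    rw [List.range_succ, List.flatMap_append, List.length_append, ih, List.flatMap_cons]
    simp only [List.flatMap_nil, List.append_nil, List.length_map, List.length_range']
    rw [pvRS, show w - (k + 1) = w - 1 - k from by omega]

theorem enum_range'_sum (m : Nat) : ∀ (a s : Nat) (G : Int → Nat → Int),
    ((PySem.List.enumerate (List.range' a m) (s : Int)).map (fun p => G p.1 p.2)).sum
      = ∑ t ∈ Finset.range m, G ((s + t : Nat) : Int) (a + t) := by
  induction m with
  | zero => intro a s G; simp [PySem.List.enumerate_nil]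
  | succ m ih =>
    intro a s G
    rw [List.range'_succ, PySem.List.enumerate_cons, List.map_cons, List.sum_cons,
      Finset.sum_range_succ']
    rw [show (s : Int) + 1 = ((s + 1 : Nat) : Int) from by push_cast; ring]
    rw [ih (a + 1) (s + 1) G]
    have e1 : ∑ t ∈ Finset.range m, G ((s + 1 + t : Nat) : Int) (a + 1 + t)
        = ∑ t ∈ Finset.range m, G ((s + (t + 1) : Nat) : Int) (a + (t + 1)) := by
      apply Finset.sum_congr rfl
      intro t _
      rw [show s + 1 + t = s + (t + 1) from by omega, show a + 1 + t = a + (t + 1) from by omega]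
    rw [e1]
    simp only [add_zero]
    exact add_comm _ _

theorem enum_pairIdx_sum (apfl : List Int) (w : Nat) (h : Nat → Nat → Int) :
    ((PySem.List.enumerate (pvPairIdx w) 0).map
        (fun q => PySem.List.pyGetD apfl q.1 0 * h q.2.1 q.2.2)).sum
      = ∑ i ∈ Finset.range w, ∑ j ∈ Finset.Ico (i + 1) w, pvWgt apfl w i j * h i j := by
  suffices H : ∀ k : Nat,
      ((PySem.List.enumerate
          ((List.range k).flatMap
            (fun i => (List.range' (i + 1) (w - (i + 1))).map (fun j => (i, j)))) 0).map
          (fun q => PySem.List.pyGetD apfl q.1 0 * h q.2.1 q.2.2)).sum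
        = ∑ i ∈ Finset.range k, ∑ j ∈ Finset.Ico (i + 1) w, pvWgt apfl w i j * h i j by
    exact H w
  intro k
  induction k with
  | zero => simp [PySem.List.enumerate_nil]
  | succ k ih =>
    rw [List.range_succ, List.flatMap_append, PySem.List.enumerate_append,
      List.map_append, List.sum_append, ih, Finset.sum_range_succ]
    congr 1
    rw [List.flatMap_cons]
    simp only [List.flatMap_nil, List.append_nil]
    rw [show ((0 : Int) + ((List.range k).flatMap
          (fun i => (List.range' (i + 1) (w - (i + 1))).map (fun j => (i, j)))).length)
        = ((pvRS w k : Nat) : Int) from by rw [lenFlat]; simp]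
    rw [enumerate_map, List.map_map]
    have := enum_range'_sum (w - (k + 1)) (k + 1) (pvRS w k)
      (fun idx j => PySem.List.pyGetD apfl idx 0 * h k j)
    simp only [Function.comp_def] at this ⊢
    rw [this]
    rw [Finset.sum_Ico_eq_sum_range]
    apply Finset.sum_congr rfl
    intro t _
    unfold pvWgt
    congr 2
    omega


-- A's loop body computes the canonical tension of the id's sign vector
theorem A_elem_eq (afl apfl : List Int) (cid : Int) (h0 : 0 ≤ cid)
    (h1 : cid.toNat < 2 ^ afl.length) :
    ((((get_combination cid (afl.length : Int)).zip afl).map (fun p => p.1 * p.2)).sum +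
      ((PySem.List.enumerate (pvPairs (get_combination cid (afl.length : Int))) 0).map
          (fun p => PySem.List.pyGetD apfl p.1 0 * p.2.1 * p.2.2)).sum)
      = pvTen afl apfl (pvCombo cid.toNat afl.length) := by
  rcases Nat.eq_zero_or_pos afl.length with hw0 | hwpos
  · have hafl : afl = [] := List.eq_nil_of_length_eq_zero hw0
    subst hafl
    have hcid : cid = 0 := by simp at h1; omega
    subst hcid
    simp [get_combination, pvBinFormat, pvPairs, pvTen]
  · rw [get_combination_eq h0 h1 hwpos]
    set b := pvCombo cid.toNat afl.length with hb
    have hblen : b.length = afl.length := length_pvCombo _ _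
    rw [zip_mul_sum_range b afl (by rw [hblen]), hblen]
    rw [pvPairs_eq b, hblen, enumerate_map, List.map_map]
    have hfun : ((fun p : Int × Int × Int => PySem.List.pyGetD apfl p.1 0 * p.2.1 * p.2.2) ∘
          (fun q : Int × Nat × Nat => (q.1, b.getD q.2.1 0, b.getD q.2.2 0)))
        = fun q : Int × Nat × Nat =>
            PySem.List.pyGetD apfl q.1 0 * (b.getD q.2.1 0 * b.getD q.2.2 0) := by
      funext q
      simp [Function.comp, mul_assoc]
    rw [hfun, enum_pairIdx_sum apfl afl.length (fun i j => b.getD i 0 * b.getD j 0)]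
    unfold pvTen
    rw [Finset.sum_add_distrib]
    congr 1
    apply Finset.sum_congr rfl
    intro i _
    apply Finset.sum_congr rfl
    intro j _
    ring


-- B's tables -----------------------------------------------------------------

theorem pvRowStart_eq (w : Nat) : pvRowStart w = ((List.range w).map (pvRS w), pvRS w w) := by
  suffices H : ∀ k : Nat,
      (List.range k).foldl (fun st i => (st.1 ++ [st.2], st.2 + (w - 1 - i))) (([] : List Nat), 0)
        = ((List.range k).map (pvRS w), pvRS w k) by
    exact H w
  intro k
  induction k with
  | zero => rfl
  | succ k ih =>
    rw [List.range_succ, List.foldl_append, ih, List.foldl_cons, List.foldl_nil,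
      List.map_append]
    rfl

theorem getD_map_range {α : Type} (w : Nat) (f : Nat → α) (i : Nat) (d : α) (hi : i < w) :
    (((List.range w).map f).getD i d) = f i := by
  rw [List.getD_eq_getElem _ _ (by simpa using hi)]
  simp

theorem pvPw_eq (apfl : List Int) (w i j : Nat) (hi : i < w) (hj : j < w) :
    pvPw apfl ((pvRowStart w).1) i j
      = if i < j then pvWgt apfl w i j else pvWgt apfl w j i := by
  unfold pvPw
  rw [pvRowStart_eq]
  by_cases h : i < j
  · rw [if_pos h, if_pos h]
    simp only
    rw [getD_map_range w (pvRS w) i 0 hi]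
    rfl
  · rw [if_neg h, if_neg h]
    simp only
    rw [getD_map_range w (pvRS w) j 0 hj]
    rfl

theorem nbr_getD (apfl : List Int) (w p : Nat) (hp : p < w) :
    (pvNbr apfl w).getD p []
      = ((List.range w).filter (fun j => j ≠ p)).map
          (fun j => (j, pvPw apfl ((pvRowStart w).1) p j)) := by
  unfold pvNbr
  rw [getD_map_range w _ p [] hp]


-- the flip step: B's tension update is exactly the change of the canonical tension
theorem flip_eq (afl apfl b : List Int) (p : Nat) (t : Int)
    (hb : b.length = afl.length) (hp : p < afl.length) :
    ((pvNbr apfl afl.length).getD p []).foldl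
        (fun a q => a - 2 * (b.getD p 0) * q.2 * (b.set p (-(b.getD p 0))).getD q.1 0)
        (t - 2 * (b.getD p 0) * afl.getD p 0)
      = t - pvTen afl apfl b + pvTen afl apfl (b.set p (-(b.getD p 0))) := by
  set w := afl.length with hw
  set s := b.getD p 0 with hs
  set b' := b.set p (-s) with hb'
  have hget : ∀ q, b'.getD q 0 = if q = p then -s else b.getD q 0 := by
    intro q
    exact getD_set_lt (-s) q (by omega)
  -- the fold subtracts a sum over the neighbour row
  rw [foldl_sub, nbr_getD apfl w p hp, List.map_map]
  -- name the two halves of the neighbour sum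
  set S1 := ∑ j ∈ Finset.range p, pvWgt apfl w j p * s * b.getD j 0 with hS1
  set S2 := ∑ j ∈ Finset.Ico (p + 1) w, pvWgt apfl w p j * s * b.getD j 0 with hS2
  have hrow : ((((List.range w).filter (fun j => j ≠ p)).map
        ((fun q : Nat × Int => 2 * s * q.2 * b'.getD q.1 0) ∘
          (fun j => (j, pvPw apfl ((pvRowStart w).1) p j)))).sum)
      = 2 * S1 + 2 * S2 := by
    rw [sum_map_filter, lsum_range]
    have hterm : ∀ j ∈ Finset.range w,
        (if (j ≠ p : Bool) then ((fun q : Nat × Int => 2 * s * q.2 * b'.getD q.1 0) ∘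
            (fun j => (j, pvPw apfl ((pvRowStart w).1) p j))) j else 0)
          = (if j < p then 2 * (pvWgt apfl w j p * s * b.getD j 0)
              else if p < j then 2 * (pvWgt apfl w p j * s * b.getD j 0) else 0) := by
      intro j hj
      rw [Finset.mem_range] at hj
      by_cases hjp : j = p
      · subst hjp
        simp
      · rw [if_pos (by simpa using hjp)]
        simp only [Function.comp]
        rw [pvPw_eq apfl w p j hp hj, hget j, if_neg hjp]
        rcases Nat.lt_trichotomy j p with h | h | h
        · rw [if_neg (show ¬ p < j by omega), if_pos h]
          ring
        · omega
        · rw [if_pos h, if_neg (by omega), if_pos h]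
          ring
    rw [Finset.sum_congr rfl hterm]
    rw [Finset.range_eq_Ico, ← Finset.sum_Ico_consecutive _ (Nat.zero_le p) (by omega : p ≤ w),
      ← Finset.sum_Ico_consecutive _ (by omega : p ≤ p + 1) (by omega : p + 1 ≤ w),
      Nat.Ico_succ_singleton, Finset.sum_singleton, if_neg (by omega), if_neg (by omega)]
    have e1 : ∑ j ∈ Finset.Ico 0 p, (if j < p then 2 * (pvWgt apfl w j p * s * b.getD j 0)
        else if p < j then 2 * (pvWgt apfl w p j * s * b.getD j 0) else 0)
        = ∑ j ∈ Finset.range p, 2 * (pvWgt apfl w j p * s * b.getD j 0) := by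
      rw [← Finset.range_eq_Ico]
      apply Finset.sum_congr rfl
      intro j hj
      rw [Finset.mem_range] at hj
      rw [if_pos hj]
    have e2 : ∑ j ∈ Finset.Ico (p + 1) w, (if j < p then 2 * (pvWgt apfl w j p * s * b.getD j 0)
        else if p < j then 2 * (pvWgt apfl w p j * s * b.getD j 0) else 0)
        = ∑ j ∈ Finset.Ico (p + 1) w, 2 * (pvWgt apfl w p j * s * b.getD j 0) := by
      apply Finset.sum_congr rfl
      intro j hj
      rw [Finset.mem_Ico] at hj
      rw [if_neg (by omega), if_pos (by omega)]
    rw [e1, e2, ← Finset.mul_sum, ← Finset.mul_sum, hS1, hS2]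
    ring
  rw [hrow]
  -- the canonical tension changes by exactly the subtracted amount
  have hmain : pvTen afl apfl b' - pvTen afl apfl b = -(2 * s * afl.getD p 0) - (2 * S1 + 2 * S2) := by
    unfold pvTen
    rw [← hw, ← Finset.sum_sub_distrib]
    have hΔ : ∀ i ∈ Finset.range w,
        ((afl.getD i 0 * b'.getD i 0 +
            ∑ j ∈ Finset.Ico (i + 1) w, pvWgt apfl w i j * b'.getD i 0 * b'.getD j 0) -
          (afl.getD i 0 * b.getD i 0 +
            ∑ j ∈ Finset.Ico (i + 1) w, pvWgt apfl w i j * b.getD i 0 * b.getD j 0))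
        = (if i = p then -(2 * s * afl.getD p 0) - 2 * S2
            else if i < p then -(2 * (pvWgt apfl w i p * s * b.getD i 0)) else 0) := by
      intro i hi
      rw [Finset.mem_range] at hi
      rcases Nat.lt_trichotomy i p with h | h | h
      · -- i < p : only the j = p pair term changes
        rw [if_neg (by omega), if_pos h, hget i, if_neg (by omega)]
        have e1 : ∑ j ∈ Finset.Ico (i + 1) w, pvWgt apfl w i j * b.getD i 0 * b'.getD j 0
            - ∑ j ∈ Finset.Ico (i + 1) w, pvWgt apfl w i j * b.getD i 0 * b.getD j 0
            = ∑ j ∈ Finset.Ico (i + 1) w,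
                (if j = p then -(2 * (pvWgt apfl w i p * s * b.getD i 0)) else 0) := by
          rw [← Finset.sum_sub_distrib]
          apply Finset.sum_congr rfl
          intro j hj
          rw [hget j]
          by_cases hjp : j = p
          · subst hjp
            rw [if_pos rfl, if_pos rfl]
            ring
          · rw [if_neg hjp, if_neg hjp]
            ring
        rw [Finset.sum_ite_eq' (Finset.Ico (i + 1) w) p
            (fun _ => -(2 * (pvWgt apfl w i p * s * b.getD i 0)))] at e1
        rw [if_pos (by rw [Finset.mem_Ico]; omega)] at e1
        linarith [e1]
      · -- i = p : the linear term and all upper pair terms change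
        subst h
        rw [if_pos rfl, hget i, if_pos rfl]
        have e1 : ∑ j ∈ Finset.Ico (i + 1) w, pvWgt apfl w i j * -s * b'.getD j 0
            = ∑ j ∈ Finset.Ico (i + 1) w, -(pvWgt apfl w i j * s * b.getD j 0) := by
          apply Finset.sum_congr rfl
          intro j hj
          rw [Finset.mem_Ico] at hj
          rw [hget j, if_neg (by omega)]
          ring
        rw [e1, Finset.sum_neg_distrib, ← hS2]
        ring
      · -- i > p : nothing changes
        rw [if_neg (by omega), if_neg (by omega), hget i, if_neg (by omega)]
        have e1 : ∑ j ∈ Finset.Ico (i + 1) w, pvWgt apfl w i j * b.getD i 0 * b'.getD j 0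
            = ∑ j ∈ Finset.Ico (i + 1) w, pvWgt apfl w i j * b.getD i 0 * b.getD j 0 := by
          apply Finset.sum_congr rfl
          intro j hj
          rw [Finset.mem_Ico] at hj
          rw [hget j, if_neg (by omega)]
        rw [e1]
        ring
    rw [Finset.sum_congr rfl hΔ]
    rw [Finset.range_eq_Ico, ← Finset.sum_Ico_consecutive _ (Nat.zero_le p) (by omega : p ≤ w),
      ← Finset.sum_Ico_consecutive _ (by omega : p ≤ p + 1) (by omega : p + 1 ≤ w),
      Nat.Ico_succ_singleton, Finset.sum_singleton, if_pos rfl]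
    have e2 : ∑ i ∈ Finset.Ico 0 p, (if i = p then -(2 * s * afl.getD p 0) - 2 * S2
        else if i < p then -(2 * (pvWgt apfl w i p * s * b.getD i 0)) else 0)
        = ∑ i ∈ Finset.range p, -(2 * (pvWgt apfl w i p * s * b.getD i 0)) := by
      rw [← Finset.range_eq_Ico]
      apply Finset.sum_congr rfl
      intro i hi
      rw [Finset.mem_range] at hi
      rw [if_neg (by omega), if_pos hi]
    have e3 : ∑ i ∈ Finset.Ico (p + 1) w, (if i = p then -(2 * s * afl.getD p 0) - 2 * S2
        else if i < p then -(2 * (pvWgt apfl w i p * s * b.getD i 0)) else 0) = 0 := by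
      apply Finset.sum_eq_zero
      intro i hi
      rw [Finset.mem_Ico] at hi
      rw [if_neg (by omega), if_neg (by omega)]
    rw [e2, e3, Finset.sum_neg_distrib, ← Finset.mul_sum, ← hS1]
    ring
  linarith [hmain]


-- the while loop: binary increment of the sign vector, tension kept in sync
theorem pvIncLoop_spec (afl apfl : List Int) :
    ∀ (u : List Int), u ≠ [] → ∀ zs : List Int, u.length + zs.length = afl.length →
    pvIncLoop afl (pvNbr apfl afl.length) (u.length - 1) (u.reverse ++ zs)
        (pvTen afl apfl (u.reverse ++ zs))
      = ((pvIncL u).reverse ++ zs, pvTen afl apfl ((pvIncL u).reverse ++ zs)) := by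
  intro u
  induction u with
  | nil => intro h; exact absurd rfl h
  | cons s u' ih =>
    intro _ zs hlen
    simp only [List.length_cons] at hlen
    have hbits : (s :: u').reverse ++ zs = u'.reverse ++ s :: zs := by simp
    have hlen' : (u'.reverse ++ s :: zs).length = afl.length := by simp; omega
    have hrevlen : u'.reverse.length = u'.length := by simp
    have hp : u'.length < afl.length := by omega
    have hgetp : (u'.reverse ++ s :: zs).getD u'.length 0 = s := by
      conv_lhs => rw [← hrevlen]
      exact getD_append_length _ _ _
    have hset : ∀ x : Int, (u'.reverse ++ s :: zs).set u'.length x = u'.reverse ++ x :: zs := by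
      intro x
      conv_lhs => rw [← hrevlen]
      exact set_append_length _ _ _ _
    rw [List.length_cons, Nat.add_sub_cancel, hbits, pvIncLoop.eq_def]
    dsimp only
    rw [flip_eq afl apfl (u'.reverse ++ s :: zs) u'.length _ hlen' hp]
    rw [show pvTen afl apfl (u'.reverse ++ s :: zs) - pvTen afl apfl (u'.reverse ++ s :: zs)
          + pvTen afl apfl ((u'.reverse ++ s :: zs).set u'.length
              (-((u'.reverse ++ s :: zs).getD u'.length 0)))
        = pvTen afl apfl ((u'.reverse ++ s :: zs).set u'.length
            (-((u'.reverse ++ s :: zs).getD u'.length 0))) from by ring]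
    rw [hgetp, hset]
    by_cases hs : s = 1
    · rw [if_pos hs]
      cases u' with
      | nil =>
        simp only [List.reverse_nil, List.nil_append, List.length_nil]
        rw [show pvIncL [s] = [-s] from by simp [pvIncL, hs]]
        simp
      | cons v u'' =>
        simp only [List.length_cons]
        have step := ih (List.cons_ne_nil v u'') ((-s) :: zs) (by simp at hlen ⊢; omega)
        simp only [List.length_cons, Nat.add_sub_cancel] at step
        rw [show (v :: u'').reverse ++ -s :: zs = ((v :: u'').reverse ++ [-s]) ++ zs from by simp] at step
        rw [show ((v :: u'').reverse ++ [-s]) ++ zs = (v :: u'').reverse ++ -s :: zs from by simp] at step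
        rw [step]
        rw [show pvIncL (s :: v :: u'') = -1 :: pvIncL (v :: u'') from by rw [pvIncL, if_pos hs]]
        rw [hs]
        simp
    · rw [if_neg hs]
      rw [show pvIncL (s :: u') = (-s) :: u' from by rw [pvIncL, if_neg hs]]
      simp

-- one increment step on a canonical state
theorem pvIncLoop_combo (afl apfl : List Int) (hw : 1 ≤ afl.length) (n : Nat) :
    pvIncLoop afl (pvNbr apfl afl.length) (afl.length - 1) (pvCombo n afl.length)
        (pvTen afl apfl (pvCombo n afl.length))
      = (pvCombo (n + 1) afl.length, pvTen afl apfl (pvCombo (n + 1) afl.length)) := by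
  have h1 : pvCombo n afl.length = (pvLCombo n afl.length).reverse ++ [] := by
    rw [pvCombo_eq_reverse, List.append_nil]
  have hne : pvLCombo n afl.length ≠ [] := by
    intro h
    have := length_pvLCombo n afl.length
    rw [h] at this
    simp at this
    omega
  have hlen : (pvLCombo n afl.length).length + ([] : List Int).length = afl.length := by
    rw [length_pvLCombo]; simp
  have := pvIncLoop_spec afl apfl (pvLCombo n afl.length) hne [] hlen
  rw [length_pvLCombo] at this
  rw [h1, this, pvIncL_lCombo, List.append_nil, ← pvCombo_eq_reverse]

-- the initial sign vector is the canonical one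
theorem bits_init (lo : Int) (h0 : 0 ≤ lo) (w : Nat) :
    (List.range w).map (fun p =>
        if PySem.Int.mod (PySem.Int.floordiv lo ((2 : Int) ^ (w - 1 - p))) 2 = 1
        then (1 : Int) else -1)
      = pvCombo lo.toNat w := by
  unfold pvCombo
  apply List.map_congr_left
  intro k _
  obtain ⟨m, rfl⟩ : ∃ m : Nat, lo = (m : Int) := ⟨lo.toNat, (Int.toNat_of_nonneg h0).symm⟩
  rw [show (2 : Int) ^ (w - 1 - k) = ((2 ^ (w - 1 - k) : Nat) : Int) from by push_cast; ring,
    show (2 : Int) = ((2 : Nat) : Int) from by norm_num]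
  rw [PySem.Int.floordiv_natCast, PySem.Int.mod_natCast, Int.toNat_natCast,
    Nat.testBit_eq_decide_div_mod_eq]
  rcases Nat.mod_two_eq_zero_or_one (m / 2 ^ (w - 1 - k)) with h | h <;> simp [h]

-- the initial tension is the canonical one
theorem foldl_ite_add' {α : Type} (l : List α) (P : α → Prop) [DecidablePred P]
    (g : α → Int) (init : Int) :
    l.foldl (fun a x => if P x then a + g x else a) init
      = init + (l.map (fun x => if P x then g x else 0)).sum := by
  induction l generalizing init with
  | nil => simp
  | cons x xs ih =>
    rw [List.foldl_cons, List.map_cons, List.sum_cons]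
    by_cases h : P x
    · rw [if_pos h, ih, if_pos h]; ring
    · rw [if_neg h, ih, if_neg h]; ring

theorem sum_ite_lt (w i : Nat) (f : Nat → Int) :
    ∑ j ∈ Finset.range w, (if i < j then f j else 0)
      = ∑ j ∈ Finset.Ico (i + 1) w, f j := by
  by_cases hiw : i + 1 ≤ w
  · rw [Finset.range_eq_Ico,
      ← Finset.sum_Ico_consecutive _ (Nat.zero_le (i + 1)) hiw]
    have e1 : ∑ j ∈ Finset.Ico 0 (i + 1), (if i < j then f j else 0) = 0 := by
      apply Finset.sum_eq_zero
      intro j hj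
      rw [Finset.mem_Ico] at hj
      rw [if_neg (by omega)]
    have e2 : ∑ j ∈ Finset.Ico (i + 1) w, (if i < j then f j else 0)
        = ∑ j ∈ Finset.Ico (i + 1) w, f j := by
      apply Finset.sum_congr rfl
      intro j hj
      rw [Finset.mem_Ico] at hj
      rw [if_pos (by omega)]
    rw [e1, e2, zero_add]
  · rw [Finset.Ico_eq_empty (by omega), Finset.sum_empty]
    apply Finset.sum_eq_zero
    intro j hj
    rw [Finset.mem_range] at hj
    rw [if_neg (by omega)]

theorem t_init (afl apfl bits : List Int) :
    (List.range afl.length).foldl (fun t i =>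
        ((pvNbr apfl afl.length).getD i []).foldl
          (fun t q => if i < q.1 then t + q.2 * bits.getD i 0 * bits.getD q.1 0 else t)
          (t + afl.getD i 0 * bits.getD i 0)) 0
      = pvTen afl apfl bits := by
  set w := afl.length with hw
  have hbody : ∀ (t : Int) (i : Nat), i ∈ List.range w →
      ((pvNbr apfl w).getD i []).foldl
          (fun t q => if i < q.1 then t + q.2 * bits.getD i 0 * bits.getD q.1 0 else t)
          (t + afl.getD i 0 * bits.getD i 0)
        = t + (afl.getD i 0 * bits.getD i 0 +
            ∑ j ∈ Finset.Ico (i + 1) w, pvWgt apfl w i j * bits.getD i 0 * bits.getD j 0) := by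
    intro t i hi
    rw [List.mem_range] at hi
    rw [foldl_ite_add' _ (fun q : Nat × Int => i < q.1), nbr_getD apfl w i hi, List.map_map,
      sum_map_filter, lsum_range]
    have h2 : ∀ j ∈ Finset.range w,
        (if (decide (j ≠ i) : Bool) then ((fun q : Nat × Int => if i < q.1 then q.2 * bits.getD i 0 * bits.getD q.1 0 else 0) ∘ (fun j => (j, pvPw apfl ((pvRowStart w).1) i j))) j else 0)
          = (if i < j then pvWgt apfl w i j * bits.getD i 0 * bits.getD j 0 else 0) := by
      intro j hj
      rw [Finset.mem_range] at hj
      simp only [Function.comp_def]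
      by_cases hij : i < j
      · rw [if_pos (by simp; omega), if_pos hij, if_pos hij,
          pvPw_eq apfl w i j hi hj, if_pos hij]
      · by_cases hji : j = i
        · subst hji
          rw [if_neg (by simp), if_neg hij]
        · rw [if_pos (by simpa using hji), if_neg hij, if_neg hij]
    rw [Finset.sum_congr rfl h2, sum_ite_lt w i]
    ring
  have step := PySem.List.foldl_congr_mem (List.range w) _
    (fun (t : Int) (i : Nat) => t + (afl.getD i 0 * bits.getD i 0 +
      ∑ j ∈ Finset.Ico (i + 1) w, pvWgt apfl w i j * bits.getD i 0 * bits.getD j 0)) 0 hbody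
  rw [step, PySem.List.foldl_add, lsum_range]
  unfold pvTen
  rw [← hw, zero_add]



-- the outer loop over the remaining ids
theorem outer_loop (afl apfl : List Int) (hw : 1 ≤ afl.length) :
    ∀ (m : Nat) (a : Int), 0 ≤ a → ∀ acc : List Int,
    ((PySem.List.pyRange (a + 1) (a + 1 + (m : Int)) 1).foldl
        (fun (st : List Int × Int × List Int) _ =>
          (let r := pvIncLoop afl (pvNbr apfl afl.length) (afl.length - 1) st.1 st.2.1
           (r.1, r.2, st.2.2 ++ [r.2])))
        (pvCombo a.toNat afl.length, pvTen afl apfl (pvCombo a.toNat afl.length), acc)).2.2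
      = acc ++ (PySem.List.pyRange (a + 1) (a + 1 + (m : Int)) 1).map
          (fun id => pvTen afl apfl (pvCombo id.toNat afl.length)) := by
  intro m
  induction m with
  | zero =>
    intro a h0 acc
    rw [Nat.cast_zero, add_zero, PySem.List.pyRange_one_eq_nil (le_refl _)]
    simp
  | succ m ih =>
    intro a h0 acc
    have hlt : a + 1 < a + 1 + ((m + 1 : Nat) : Int) := by push_cast; omega
    rw [PySem.List.pyRange_one_cons hlt, List.foldl_cons, List.map_cons]
    have hstep : pvIncLoop afl (pvNbr apfl afl.length) (afl.length - 1)
          (pvCombo a.toNat afl.length) (pvTen afl apfl (pvCombo a.toNat afl.length))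
        = (pvCombo (a + 1).toNat afl.length, pvTen afl apfl (pvCombo (a + 1).toNat afl.length)) := by
      rw [pvIncLoop_combo afl apfl hw a.toNat, show a.toNat + 1 = (a + 1).toNat from by omega]
    simp only [hstep]
    have hend : a + 1 + ((m + 1 : Nat) : Int) = (a + 1) + 1 + (m : Int) := by push_cast; ring
    rw [hend, ih (a + 1) (by omega) (acc ++ [pvTen afl apfl (pvCombo (a + 1).toNat afl.length)])]
    simp

-- ===== VERDICT (by name: the statement is the Claim_ definition above) =====
theorem calc_tension_spec : Claim_equal_calc_tension := by
  unfold Claim_equal_calc_tension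
  intro cr afl apfl _ hpre
  unfold Spec_calc_tension calc_tension calc_tension_alt
  simp only []
  obtain ⟨-, hp⟩ := hpre
  set lo := PySem.List.pyGetD cr 0 0 with hlo
  set hi := PySem.List.pyGetD cr 1 0 with hhi
  by_cases hord : hi ≤ lo
  · rw [if_pos hord, PySem.List.pyRange_one_eq_nil hord, List.map_nil]
  · rw [if_neg hord]
    rw [not_le] at hord
    obtain ⟨h0, hub, -⟩ := hp hord
    set w := afl.length with hw
    have hcast : ((2 ^ w : Nat) : Int) = (2 : Int) ^ w := by push_cast; ring
    -- A is the canonical tension at each id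
    have hA : (PySem.List.pyRange lo hi 1).map
          (fun combination_id =>
            ((((get_combination combination_id (w : Int)).zip afl).map (fun p => p.1 * p.2)).sum +
              ((PySem.List.enumerate (pvPairs (get_combination combination_id (w : Int))) 0).map
                  (fun p => PySem.List.pyGetD apfl p.1 0 * p.2.1 * p.2.2)).sum))
        = (PySem.List.pyRange lo hi 1).map
            (fun id => pvTen afl apfl (pvCombo id.toNat w)) := by
      apply List.map_congr_left
      intro cid hcid
      rw [PySem.List.mem_pyRange_one] at hcid
      have hc2 : cid.toNat < 2 ^ w := by
        have h2 : cid < ((2 ^ w : Nat) : Int) := by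
          rw [hcast]
          omega
        omega
      exact A_elem_eq afl apfl cid (by omega) hc2
    -- B's initial state is canonical
    rw [bits_init lo (by omega) w, t_init afl apfl (pvCombo lo.toNat w)]
    rcases Nat.eq_zero_or_pos w with hw0 | hwpos
    · -- no actors: the id range is {0} and both sides are the single tension 0
      have hlo0 : lo = 0 := by
        rw [hw0] at hub
        simp at hub
        omega
      have hhi1 : hi = 1 := by
        rw [hw0] at hub
        simp at hub
        omega
      rw [hlo0, hhi1] at hA ⊢
      rw [PySem.List.pyRange_one_eq_nil (by norm_num : (1 : Int) ≤ 0 + 1), List.foldl_nil]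
      rw [hA, PySem.List.pyRange_one_cons (by norm_num : (0 : Int) < 1), List.map_cons,
        PySem.List.pyRange_one_eq_nil (by norm_num : (1 : Int) ≤ 0 + 1), List.map_nil]
    · -- at least one actor: walk the ids incrementally
      have hm : hi = lo + 1 + (((hi - (lo + 1)).toNat : Nat) : Int) := by omega
      rw [hA, PySem.List.pyRange_one_cons hord, List.map_cons]
      conv_lhs => rw [hm]
      conv_rhs => rw [hm]
      rw [outer_loop afl apfl hwpos ((hi - (lo + 1)).toNat) lo (by omega)
        [pvTen afl apfl (pvCombo lo.toNat w)]]
      simp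
      intro a _ _
      rw [hw]
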